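-- pv_equiv track=rewrite | github.com/rahaft/ecg-functions-public | scripts/kaggle_to_gcs_transfer.py | select_bucket_for_file
-- ===== SOURCE A (Python) =====
-- MAX_BUCKET_SIZE = 20 * 1024 * 1024 * 1024  # 20GB per bucket (approximate limit)
--
-- def select_bucket_for_file(file_size, bucket_usage, buckets):
--     """
--     Select bucket for file based on current usage
--     Distributes files evenly across buckets
--     """
--     # Find bucket with least usage
--     min_usage = min(bucket_usage.values())
--     min_buckets = [b for b, usage in bucket_usage.items() if usage == min_usage]
--
--     # If all buckets are under limit, use round-robin
--     if min_usage < MAX_BUCKET_SIZE: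
--         # Use hash of filename for consistent distribution
--         bucket_index = hash(file_size) % len(min_buckets)
--         return min_buckets[bucket_index]
--
--     # If all buckets are full, use the one with most space
--     max_available = max(bucket_usage.values())
--     for bucket, usage in bucket_usage.items():
--         if usage == max_available:
--             return bucket
--
--     # Fallback to first bucket
--     return buckets[0]
-- ===== SOURCE B (Python) =====
-- MAX_BUCKET_SIZE = 20 * 1024 * 1024 * 1024  # 20GB per bucket (approximate limit)
--
-- def select_bucket_for_file(file_size, bucket_usage, buckets):
--     """
--     Select bucket for file based on current usage.
--     Single pass over bucket_usage.items(): tracks the minimum usage together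
--     with the ordered list of buckets tied at that minimum, and the first
--     bucket attaining the maximum usage.
--     """
--     it = iter(bucket_usage.items())
--     first_bucket, first_usage = next(it)
--     min_usage, min_buckets = first_usage, [first_bucket]
--     max_usage, max_bucket = first_usage, first_bucket
--     for bucket, usage in it:
--         if usage < min_usage:
--             min_usage, min_buckets = usage, [bucket]
--         elif usage == min_usage:
--             min_buckets.append(bucket)
--         if usage > max_usage:
--             max_usage, max_bucket = usage, bucket
--     if min_usage < MAX_BUCKET_SIZE:
--         return min_buckets[hash(file_size) % len(min_buckets)]
--     return max_bucket
-- ===== Notes on version B (the rewrite author's own statement) =====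
-- stated objective: alternative
-- what changed: Replaces A's four separate scans of the dict (min of values, filter comprehension for the tied minimum, max of values, final linear search for the first maximal bucket) with a single accumulation pass that maintains the running minimum with its ordered tie list and the running maximum with the first bucket attaining it.
-- outside the precondition, e.g. on select_bucket_for_file(0, {}, ['x']): A raises ValueError, B raises StopIteration
import Mathlib
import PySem

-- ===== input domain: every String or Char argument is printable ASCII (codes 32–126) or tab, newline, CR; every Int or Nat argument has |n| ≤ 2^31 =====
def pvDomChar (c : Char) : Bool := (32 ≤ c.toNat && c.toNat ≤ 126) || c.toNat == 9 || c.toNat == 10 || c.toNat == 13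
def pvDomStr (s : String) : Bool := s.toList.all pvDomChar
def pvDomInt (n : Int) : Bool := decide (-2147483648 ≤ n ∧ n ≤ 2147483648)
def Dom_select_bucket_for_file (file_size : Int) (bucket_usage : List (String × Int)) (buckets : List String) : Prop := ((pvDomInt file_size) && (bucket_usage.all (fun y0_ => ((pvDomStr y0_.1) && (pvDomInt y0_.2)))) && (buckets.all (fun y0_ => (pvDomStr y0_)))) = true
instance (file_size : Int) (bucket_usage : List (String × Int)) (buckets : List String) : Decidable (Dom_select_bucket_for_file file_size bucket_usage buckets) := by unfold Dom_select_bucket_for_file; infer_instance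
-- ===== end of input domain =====

-- B replaces A's four scans of the dict (min, filter of ties, max, first-max search)
-- by one accumulation pass; same result, proved equal on all non-empty dicts.

-- MAX_BUCKET_SIZE = 20 * 1024 * 1024 * 1024
def pvMaxBucketSize : Int := 21474836480

-- CPython's hash(n) for an int with |n| < 2^61 - 1 is n itself, except hash(-1) = -2;
-- Dom bounds |file_size| ≤ 2^31, so this is exact on the whole domain.
def pvHashInt (n : Int) : Int := if n = -1 then -2 else n

-- ===== PORT A =====
-- the dict parameter arrives as an association list; PySem.Dict.ofList is the
-- type-convention bridge (insertion order, later value for a repeated key wins)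
def select_bucket_for_file (file_size : Int) (bucket_usage : List (String × Int)) (buckets : List String) : String :=
  let items := (PySem.Dict.ofList bucket_usage).items
  let vals := items.map Prod.snd
  match PySem.List.min? vals (fun v => v) with
  | none => ""      -- min() of an empty dict raises ValueError; excluded by Pre_
  | some min_usage =>
    let min_buckets := (items.filter (fun kv => kv.2 == min_usage)).map Prod.fst
    if min_usage < pvMaxBucketSize then
      (PySem.List.pyGet? min_buckets (PySem.Int.mod (pvHashInt file_size) (min_buckets.length : Int))).getD ""
    else
      match PySem.List.max? vals (fun v => v) with
      | none => ""  -- unreachable: vals nonempty here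
      | some max_available =>
        match items.find? (fun kv => kv.2 == max_available) with
        | some kv => kv.1
        | none => (PySem.List.pyGet? buckets 0).getD ""   -- A's `return buckets[0]` fallback (unreachable)

-- ===== PORT B =====
-- one fold step: running minimum + ordered tie list, running maximum + first bucket attaining it
def pvStep (s : Int × List String × Int × String) (kv : String × Int) : Int × List String × Int × String :=
  ((if kv.2 < s.1 then kv.2 else s.1),
   (if kv.2 < s.1 then [kv.1] else if kv.2 = s.1 then s.2.1 ++ [kv.1] else s.2.1),
   (if s.2.2.1 < kv.2 then kv.2 else s.2.2.1),
   (if s.2.2.1 < kv.2 then kv.1 else s.2.2.2))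

def select_bucket_for_file_alt (file_size : Int) (bucket_usage : List (String × Int)) (buckets : List String) : String :=
  match (PySem.Dict.ofList bucket_usage).items with
  | [] => ""        -- B's next() raises StopIteration on an empty dict; excluded by Pre_
  | (k0, v0) :: rest =>
    let st := rest.foldl pvStep (v0, [k0], v0, k0)
    if st.1 < pvMaxBucketSize then
      (PySem.List.pyGet? st.2.1 (PySem.Int.mod (pvHashInt file_size) (st.2.1.length : Int))).getD ""
    else st.2.2.2

-- ===== PRECONDITION & SPEC =====
-- Pre_ excludes only the empty dict, on which A raises ValueError (min() of an empty sequence).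
def Pre_select_bucket_for_file (file_size : Int) (bucket_usage : List (String × Int)) (buckets : List String) : Prop :=
  bucket_usage ≠ []
instance (file_size : Int) (bucket_usage : List (String × Int)) (buckets : List String) : Decidable (Pre_select_bucket_for_file file_size bucket_usage buckets) := by unfold Pre_select_bucket_for_file; infer_instance

def pvWitness_select_bucket_for_file : Int × (List (String × Int)) × List String :=
  (7, [("a", 3), ("b", 3), ("c", 5)], ["a", "b", "c"])

def Spec_select_bucket_for_file (file_size : Int) (bucket_usage : List (String × Int)) (buckets : List String) (out : String) : Prop := out = select_bucket_for_file_alt file_size bucket_usage buckets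
instance (file_size : Int) (bucket_usage : List (String × Int)) (buckets : List String) (out : String) : Decidable (Spec_select_bucket_for_file file_size bucket_usage buckets out) := by unfold Spec_select_bucket_for_file; infer_instance

-- ===== CLAIM (what is proved, stated in full; the proofs are below) =====
def Claim_equal_select_bucket_for_file : Prop := ∀ (file_size : Int) (bucket_usage : List (String × Int)) (buckets : List String), Dom_select_bucket_for_file file_size bucket_usage buckets → Pre_select_bucket_for_file file_size bucket_usage buckets → Spec_select_bucket_for_file file_size bucket_usage buckets (select_bucket_for_file file_size bucket_usage buckets)

-- ===== LEMMAS AND PROOFS =====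

lemma pv_foldl_min_le (xs : List Int) (a : Int) : xs.foldl min a ≤ a := by
  induction xs generalizing a with
  | nil => exact le_refl a
  | cons x xs ih => exact le_trans (ih (min a x)) (min_le_left a x)

lemma pv_foldl_max_mem (xs : List Int) (a : Int) : xs.foldl max a ∈ a :: xs := by
  induction xs generalizing a with
  | nil => simp
  | cons x xs ih =>
    rw [List.foldl_cons]
    rcases List.mem_cons.1 (ih (max a x)) with h | h
    · rw [h]; rcases max_choice a x with hc | hc <;> simp [hc]
    · exact List.mem_cons_of_mem _ (List.mem_cons_of_mem _ h)

-- the one-pass fold computes: the minimum, the ordered keys tied at it (prefixed by the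
-- carried tie list when the carried minimum survives), the maximum, and the first key
-- attaining it (the carried one when the carried maximum survives)
lemma pv_fold_spec (xs : List (String × Int)) : ∀ (mU : Int) (mBs : List String) (MU : Int) (MB : String),
    xs.foldl pvStep (mU, mBs, MU, MB) =
      (List.foldl min mU (xs.map Prod.snd),
       ((if List.foldl min mU (xs.map Prod.snd) < mU then [] else mBs)
         ++ (xs.filter (fun kv => kv.2 == List.foldl min mU (xs.map Prod.snd))).map Prod.fst,
       (List.foldl max MU (xs.map Prod.snd),
       if MU < List.foldl max MU (xs.map Prod.snd)
         then ((xs.find? (fun kv => kv.2 == List.foldl max MU (xs.map Prod.snd))).map Prod.fst).getD MB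
         else MB))) := by
  induction xs with
  | nil => intro mU mBs MU MB; simp
  | cons x xs ih =>
    intro mU mBs MU MB
    obtain ⟨k, v⟩ := x
    simp only [List.foldl_cons, List.map_cons, List.filter_cons, List.find?_cons, pvStep]
    rw [ih]
    have hmv : (if v < mU then v else mU) = min mU v := by split_ifs <;> omega
    have hMv : (if MU < v then v else MU) = max MU v := by split_ifs <;> omega
    rw [hmv, hMv]
    have hF : List.foldl min (min mU v) (xs.map Prod.snd) ≤ min mU v := pv_foldl_min_le _ _
    have hGmem := pv_foldl_max_mem (xs.map Prod.snd) (max MU v)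
    have hG : max MU v ≤ List.foldl max (max MU v) (xs.map Prod.snd) :=
      (PySem.List.le_foldl_max (xs.map Prod.snd) (max MU v)).1
    obtain ⟨F, hFeq⟩ : ∃ F, List.foldl min (min mU v) (List.map Prod.snd xs) = F := ⟨_, rfl⟩
    obtain ⟨G, hGeq⟩ : ∃ G, List.foldl max (max MU v) (List.map Prod.snd xs) = G := ⟨_, rfl⟩
    rw [hFeq] at hF
    rw [hGeq] at hG hGmem
    simp only [hFeq, hGeq]
    simp only [Prod.mk.injEq]
    refine ⟨trivial, ?_, trivial, ?_⟩
    · -- minimum tie list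
      simp only [beq_iff_eq]
      split_ifs <;> first | rfl | (exfalso; omega) | simp [List.append_assoc]
    · -- first maximal key
      by_cases hvG : v = G
      · have hb : (v == G) = true := by simp [hvG]
        simp only [hb, hvG]
        split_ifs <;> first | rfl | (exfalso; omega) | simp
        
      · have hb : (v == G) = false := by simp [hvG]
        simp only [hb]
        by_cases hMUv : MU < v
        · have hvleG : v ≤ G := le_trans (le_max_right MU v) hG
          have hvltG : v < G := lt_of_le_of_ne hvleG hvG
          rw [if_pos (show max MU v < G by omega), if_pos (show MU < v by omega),
            if_pos (show MU < G by omega)]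
          have hGxs : G ∈ List.map Prod.snd xs := by
            rcases List.mem_cons.1 hGmem with h0 | h0
            · exfalso; omega
            · exact h0
          cases hfind : List.find? (fun kv => kv.2 == G) xs with
          | none =>
            exfalso
            obtain ⟨kv, hkv, hkv2⟩ := List.mem_map.1 hGxs
            have := List.find?_eq_none.1 hfind kv hkv
            simp [hkv2] at this
          | some kv => simp
        · have hmax : max MU v = MU := by omega
          rw [hmax, if_neg hMUv]

lemma pv_items_len_le_insert {κ ν : Type} [BEq κ] (d : PySem.Dict κ ν) (k : κ) (v : ν) :
    d.items.length ≤ ((d.insert k v).items).length := by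
  rw [PySem.Dict.items_insert]
  split_ifs <;> simp

lemma pv_update_items_len (l : List (String × Int)) : ∀ (d : PySem.Dict String Int),
    d.items.length ≤ (d.update l).items.length := by
  induction l with
  | nil => intro d; simp [PySem.Dict.update]
  | cons x xs ih =>
    intro d
    have h1 := pv_items_len_le_insert d x.1 x.2
    have h2 := ih (d.insert x.1 x.2)
    have hu : d.update (x :: xs) = (d.insert x.1 x.2).update xs := by
      simp [PySem.Dict.update]
    rw [hu]
    omega

lemma pv_items_ne_nil (l : List (String × Int)) (h : l ≠ []) :
    (PySem.Dict.ofList l).items ≠ [] := by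
  cases l with
  | nil => exact absurd rfl h
  | cons x xs =>
    have h0 : (PySem.Dict.ofList (x :: xs)) = (PySem.Dict.empty.insert x.1 x.2).update xs := by
      simp [PySem.Dict.ofList, PySem.Dict.update]
    have h1 : (PySem.Dict.empty.insert x.1 x.2).items = [(x.1, x.2)] := by
      rw [PySem.Dict.items_insert_of_not_contains _ _ (PySem.Dict.contains_empty x.1)]
      rfl
    have h2 := pv_update_items_len xs (PySem.Dict.empty.insert x.1 x.2)
    rw [h1] at h2
    intro hnil
    rw [h0] at hnil
    rw [hnil] at h2
    simp at h2

-- ===== VERDICT (by name: the statement is the Claim_ definition above) =====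
theorem select_bucket_for_file_spec : Claim_equal_select_bucket_for_file := by
  unfold Claim_equal_select_bucket_for_file
  intro fs bu bks _hDom hPre
  unfold Spec_select_bucket_for_file select_bucket_for_file select_bucket_for_file_alt
  have hne : (PySem.Dict.ofList bu).items ≠ [] := pv_items_ne_nil bu hPre
  cases hl : (PySem.Dict.ofList bu).items with
  | nil => exact absurd hl hne
  | cons hd tl =>
    obtain ⟨k0, v0⟩ := hd
    have hmle : List.foldl min v0 (tl.map Prod.snd) ≤ v0 := pv_foldl_min_le _ _
    have hMge : v0 ≤ List.foldl max v0 (tl.map Prod.snd) :=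
      (PySem.List.le_foldl_max (tl.map Prod.snd) v0).1
    have hMmem := pv_foldl_max_mem (tl.map Prod.snd) v0
    simp only [pv_fold_spec, List.map_cons, PySem.List.min?_id_cons, PySem.List.max?_id_cons,
               List.filter_cons, List.find?_cons]
    obtain ⟨m, hmeq⟩ : ∃ m, List.foldl min v0 (List.map Prod.snd tl) = m := ⟨_, rfl⟩
    obtain ⟨M, hMeq⟩ : ∃ M, List.foldl max v0 (List.map Prod.snd tl) = M := ⟨_, rfl⟩
    rw [hmeq] at hmle
    rw [hMeq] at hMge hMmem
    simp only [hmeq, hMeq]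
    by_cases hlt : m < pvMaxBucketSize
    · rw [if_pos hlt, if_pos hlt]
      rcases lt_or_eq_of_le hmle with h | h
      · have hb : (v0 == m) = false := by simp; omega
        simp [hb, if_pos h]
      · have hb : (v0 == m) = true := by simp [h]
        simp [hb, h]
    · rw [if_neg hlt, if_neg hlt]
      rcases lt_or_eq_of_le hMge with h | h
      · have hb : (v0 == M) = false := by simp; omega
        simp only [hb]
        have hMtl : M ∈ tl.map Prod.snd := by
          rcases List.mem_cons.1 hMmem with h0 | h0
          · exfalso; omega
          · exact h0
        rw [if_pos h]
        cases hfind : List.find? (fun kv => kv.2 == M) tl with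
        | none =>
          exfalso
          obtain ⟨kv, hkv, hkv2⟩ := List.mem_map.1 hMtl
          have := List.find?_eq_none.1 hfind kv hkv
          simp [hkv2] at this
        | some kv => simp
      · have hb : (v0 == M) = true := by simp [h]
        simp only [hb, if_neg (show ¬ v0 < M by omega)]
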